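-- pv_equiv track=rewrite | github.com/jurjen93/lofar_helpers | supporting_scripts/reinout/reinout/runwscleanLBautoR.py | makemaskthresholdlist
-- ===== SOURCE A (Python) =====
-- def makemaskthresholdlist(maskthresholdlist, stop):
--    maskthresholdselfcalcycle = []
--    for mm in range(stop):
--       try:
--         maskthresholdselfcalcycle.append(maskthresholdlist[mm])
--       except:
--         maskthresholdselfcalcycle.append(maskthresholdlist[-1]) # add last value
--    return maskthresholdselfcalcycle
-- ===== SOURCE B (Python) =====
-- def makemaskthresholdlist(maskthresholdlist, stop):
--     n = stop if stop > 0 else 0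
--     result = list(maskthresholdlist[:n])
--     if len(result) < n:
--         result += [maskthresholdlist[-1]] * (n - len(result))
--     return result
-- ===== Notes on version B (the rewrite author's own statement) =====
-- stated objective: simpler
-- what changed: Replaces the per-index try/except loop with one bulk slice copy of the available prefix plus a single replicate-pad of the last value.
import Mathlib
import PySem

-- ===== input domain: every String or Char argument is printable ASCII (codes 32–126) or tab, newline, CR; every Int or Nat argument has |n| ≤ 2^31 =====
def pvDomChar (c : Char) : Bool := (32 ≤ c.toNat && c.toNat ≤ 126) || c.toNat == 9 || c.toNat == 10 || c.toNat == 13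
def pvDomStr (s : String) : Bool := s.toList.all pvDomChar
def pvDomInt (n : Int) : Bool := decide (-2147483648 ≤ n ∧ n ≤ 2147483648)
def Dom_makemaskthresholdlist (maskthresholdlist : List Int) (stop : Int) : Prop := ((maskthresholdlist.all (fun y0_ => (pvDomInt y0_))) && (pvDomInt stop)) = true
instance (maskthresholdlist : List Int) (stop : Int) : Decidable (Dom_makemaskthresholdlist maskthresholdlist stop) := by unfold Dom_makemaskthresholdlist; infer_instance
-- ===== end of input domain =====

-- B replaces A's per-index try/except loop by a bulk slice copy plus a replicate-pad of the last value (same cost, simpler).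


-- ===== PORT A =====
-- for mm in range(stop): try append xs[mm]; except append xs[-1]
def makemaskthresholdlist (maskthresholdlist : List Int) (stop : Int) : List Int :=
  (PySem.List.pyRange 0 stop 1).foldl
    (fun acc mm =>
      match PySem.List.pyGet? maskthresholdlist mm with
      | some v => acc ++ [v]
      | none => acc ++ [(PySem.List.pyGet? maskthresholdlist (-1)).getD 0])
    []

-- ===== PORT B =====
-- n = clamped stop; bulk copy of the prefix slice, then pad with the last value
def makemaskthresholdlist_alt (maskthresholdlist : List Int) (stop : Int) : List Int :=
  let n : Int := if 0 < stop then stop else 0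
  let result : List Int := PySem.List.slice maskthresholdlist none (some n)
  if (result.length : Int) < n then
    result ++ List.replicate (n - result.length).toNat
      ((PySem.List.pyGet? maskthresholdlist (-1)).getD 0)
  else result

-- ===== PRECONDITION & SPEC =====
-- Pre_ excludes exactly the inputs where Python A raises an uncaught IndexError
-- (empty list with stop > 0: the except-branch's xs[-1] itself raises); B raises there too.
def Pre_makemaskthresholdlist (maskthresholdlist : List Int) (stop : Int) : Prop :=
  stop ≤ 0 ∨ maskthresholdlist ≠ []
instance (maskthresholdlist : List Int) (stop : Int) : Decidable (Pre_makemaskthresholdlist maskthresholdlist stop) := by unfold Pre_makemaskthresholdlist; infer_instance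
def pvWitness_makemaskthresholdlist : List Int × Int := ([7, 3, 2], 5)

def Spec_makemaskthresholdlist (maskthresholdlist : List Int) (stop : Int) (out : List Int) : Prop := out = makemaskthresholdlist_alt maskthresholdlist stop
instance (maskthresholdlist : List Int) (stop : Int) (out : List Int) : Decidable (Spec_makemaskthresholdlist maskthresholdlist stop out) := by unfold Spec_makemaskthresholdlist; infer_instance

-- ===== CLAIM (what is proved, stated in full; the proofs are below) =====
def Claim_equal_makemaskthresholdlist : Prop := ∀ (maskthresholdlist : List Int) (stop : Int), Dom_makemaskthresholdlist maskthresholdlist stop → Pre_makemaskthresholdlist maskthresholdlist stop → Spec_makemaskthresholdlist maskthresholdlist stop (makemaskthresholdlist maskthresholdlist stop)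

-- ===== LEMMAS AND PROOFS =====

-- A's loop body appends a single element: A is a map over the range
lemma portA_eq_map (l : List Int) (stop : Int) :
    makemaskthresholdlist l stop =
      (PySem.List.pyRange 0 stop 1).map
        (fun mm => match PySem.List.pyGet? l mm with
          | some v => v
          | none => (PySem.List.pyGet? l (-1)).getD 0) := by
  unfold makemaskthresholdlist
  have hbody : (fun (acc : List Int) mm =>
      match PySem.List.pyGet? l mm with
      | some v => acc ++ [v]
      | none => acc ++ [(PySem.List.pyGet? l (-1)).getD 0]) =
      (fun acc mm => acc ++ [match PySem.List.pyGet? l mm with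
        | some v => v
        | none => (PySem.List.pyGet? l (-1)).getD 0]) := by
    funext acc mm
    cases PySem.List.pyGet? l mm <;> rfl
  rw [hbody, PySem.List.foldl_append_singleton_eq_map]
  simp

-- B, for positive stop, is take ++ replicate in one formula (both branches of the if)
lemma portB_char (l : List Int) (stop : Int) (hs : 0 < stop) :
    makemaskthresholdlist_alt l stop =
      l.take stop.toNat ++
        List.replicate (stop.toNat - min l.length stop.toNat)
          ((PySem.List.pyGet? l (-1)).getD 0) := by
  unfold makemaskthresholdlist_alt
  have hstop : stop = ((stop.toNat : Nat) : Int) := by omega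
  simp only [if_pos hs]
  rw [hstop, PySem.List.slice_to_natCast]
  simp only [List.length_take]
  split_ifs with h
  · congr 1
    congr 1
    omega
  · have hz : stop.toNat - min l.length stop.toNat = 0 := by omega
    simp only [Int.toNat_natCast]
    rw [hz]
    simp

theorem makemaskthresholdlist_spec_aux (l : List Int) (stop : Int)
    (hpre : stop ≤ 0 ∨ l ≠ []) :
    makemaskthresholdlist l stop = makemaskthresholdlist_alt l stop := by
  by_cases hs : 0 < stop
  · have hl : l ≠ [] := hpre.resolve_left (by omega)
    rw [portA_eq_map, portB_char l stop hs, PySem.List.pyRange_one]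
    apply List.ext_getElem
    · simp; omega
    · intro i h1 h2
      simp only [List.getElem_map, List.getElem_range]
      have hi2 : i < stop.toNat := by simpa using h1
      by_cases hi : i < l.length
      · have : PySem.List.pyGet? l ((0 : Int) + (i : Nat)) = some l[i] := by
          simp [hi]
        rw [this]
        rw [List.getElem_append_left (by simp; omega)]
        simp [List.getElem_take]
      · have : PySem.List.pyGet? l ((0 : Int) + (i : Nat)) = none := by
          simp [PySem.List.pyGet?_natCast]; omega
        rw [this]
        rw [List.getElem_append_right (by simp; omega)]
        simp
  · have hs' : stop ≤ 0 := by omega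
    rw [portA_eq_map]
    unfold makemaskthresholdlist_alt
    rw [PySem.List.pyRange_one_eq_nil (by omega)]
    have h0 : (if 0 < stop then stop else 0) = ((0 : Nat) : Int) := by
      simp; omega
    simp only [h0, PySem.List.slice_to_natCast]
    simp

-- ===== VERDICT (by name: the statement is the Claim_ definition above) =====
theorem makemaskthresholdlist_spec : Claim_equal_makemaskthresholdlist := by
  intro l stop _ hpre
  exact makemaskthresholdlist_spec_aux l stop hpre
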